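-- pv_equiv track=rewrite | github.com/pypi-data/pypi-mirror-366 | packages/louieai/louieai-0.3.1.tar.gz/louieai-0.3.1/tests/unit/test_documentation.py | preprocess_code
-- ===== SOURCE A (Python) =====
-- def preprocess_code(code: str) -> str:
--     """Preprocess code to handle common documentation patterns."""
--     # Replace placeholder values
--     replacements = {
--         '"your_user"': '"test_user"',
--         '"your_pass"': '"test_pass"',
--         "'your_user'": "'test_user'",
--         "'your_pass'": "'test_pass'",
--         "hub.graphistry.com": "test.graphistry.com",
--     }
--
--     for old, new in replacements.items():
--         code = code.replace(old, new)
--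
--     return code
-- ===== SOURCE B (Python) =====
-- import re
--
-- # Single regex pass: one left-to-right scan replacing every placeholder via a
-- # lookup table, instead of five independent full passes of str.replace.
-- _MAPPING = {
--     '"your_user"': '"test_user"',
--     '"your_pass"': '"test_pass"',
--     "'your_user'": "'test_user'",
--     "'your_pass'": "'test_pass'",
--     "hub.graphistry.com": "test.graphistry.com",
-- }
-- _PATTERN = re.compile("|".join(re.escape(k) for k in _MAPPING))
--
--
-- def preprocess_code(code: str) -> str:
--     """Preprocess code to handle common documentation patterns."""
--     return _PATTERN.sub(lambda m: _MAPPING[m.group(0)], code)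
-- ===== Notes on version B (the rewrite author's own statement) =====
-- stated objective: idiomatic
-- what changed: Replaced the loop of five independent str.replace passes by a single compiled regex alternation over re.escape'd placeholder keys with a dict lookup in the substitution callback, so the string is scanned once.
-- outside the precondition, e.g. on preprocess_code('"your_user"your_pass"'): A returns '"test_user"test_pass"', B returns '"test_user"your_pass"'
import Mathlib
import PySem

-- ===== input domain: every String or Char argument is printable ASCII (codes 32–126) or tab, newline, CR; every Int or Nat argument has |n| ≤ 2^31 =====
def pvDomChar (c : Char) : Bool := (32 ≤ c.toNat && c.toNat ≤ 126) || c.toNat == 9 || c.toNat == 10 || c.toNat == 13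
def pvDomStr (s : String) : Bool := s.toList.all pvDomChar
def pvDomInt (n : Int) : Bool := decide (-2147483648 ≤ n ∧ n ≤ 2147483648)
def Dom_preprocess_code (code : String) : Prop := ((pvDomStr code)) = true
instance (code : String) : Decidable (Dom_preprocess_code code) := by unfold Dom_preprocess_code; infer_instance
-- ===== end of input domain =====

-- B replaces A's five sequential str.replace passes by one left-to-right scan with a
-- placeholder→replacement table (a compiled regex alternation in Python); same return
-- value on all inputs admitted by Pre_ below.

-- ===== PORT A =====
-- the dict of replacements, iterated in insertion order by the for loop
def preprocess_code (code : String) : String :=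
  [("\"your_user\"", "\"test_user\""),
   ("\"your_pass\"", "\"test_pass\""),
   ("'your_user'", "'test_user'"),
   ("'your_pass'", "'test_pass'"),
   ("hub.graphistry.com", "test.graphistry.com")].foldl
    (fun c p => PySem.Str.replace c p.1 p.2) code

-- ===== PORT B =====
-- the keys/values of Source B's _MAPPING, in pattern order
def pvK1 : List Char := "\"your_user\"".toList
def pvR1 : List Char := "\"test_user\"".toList
def pvK2 : List Char := "\"your_pass\"".toList
def pvR2 : List Char := "\"test_pass\"".toList
def pvK3 : List Char := "'your_user'".toList
def pvR3 : List Char := "'test_user'".toList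
def pvK4 : List Char := "'your_pass'".toList
def pvR4 : List Char := "'test_pass'".toList
def pvK5 : List Char := "hub.graphistry.com".toList
def pvR5 : List Char := "test.graphistry.com".toList

-- hand port of re.sub with the compiled alternation of the five re.escape'd literal
-- keys: one left-to-right scan; at each position the alternatives are tried in pattern
-- order, the first literal that matches is emitted as its mapped replacement and the
-- scan resumes after it; exact because every alternation branch is a plain literal.
def pvScan : List Char → List Char
  | [] => []
  | c :: t =>
    if pvK1.isPrefixOf (c :: t) then pvR1 ++ pvScan (t.drop 10)
    else if pvK2.isPrefixOf (c :: t) then pvR2 ++ pvScan (t.drop 10)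
    else if pvK3.isPrefixOf (c :: t) then pvR3 ++ pvScan (t.drop 10)
    else if pvK4.isPrefixOf (c :: t) then pvR4 ++ pvScan (t.drop 10)
    else if pvK5.isPrefixOf (c :: t) then pvR5 ++ pvScan (t.drop 17)
    else c :: pvScan t
  termination_by s => s.length
  decreasing_by all_goals (simp; try omega)

def preprocess_code_alt (code : String) : String := String.ofList (pvScan code.toList)

-- ===== PRECONDITION & SPEC =====
-- Pre_ excludes strings in which two quoted placeholders share a quote character
-- (e.g. "your_user"your_pass"): there A's later replace pass re-matches across the
-- boundary of an earlier replacement, an accidental corner of sequential replacement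
-- that no caller relies on; B's single pass resolves that corner the other way.
def Pre_preprocess_code (code : String) : Prop :=
  PySem.Str.isIn "\"your_user\"your_pass\"" code = false ∧
  PySem.Str.isIn "\"your_pass\"your_user\"" code = false ∧
  PySem.Str.isIn "'your_user'your_pass'" code = false ∧
  PySem.Str.isIn "'your_pass'your_user'" code = false
instance (code : String) : Decidable (Pre_preprocess_code code) := by
  unfold Pre_preprocess_code; infer_instance

def pvWitness_preprocess_code : String := "u = \"your_user\"\n"

def Spec_preprocess_code (code : String) (out : String) : Prop := out = preprocess_code_alt code
instance (code : String) (out : String) : Decidable (Spec_preprocess_code code out) := by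
  unfold Spec_preprocess_code; infer_instance

-- ===== CLAIM (what is proved, stated in full; the proofs are below) =====
def Claim_equal_preprocess_code : Prop := ∀ (code : String), Dom_preprocess_code code → Pre_preprocess_code code → Spec_preprocess_code code (preprocess_code code)

-- ===== LEMMAS AND PROOFS =====

-- the four excluded patterns and some building blocks, as char lists
def pvB1 : List Char := "\"your_user\"your_pass\"".toList
def pvB2 : List Char := "\"your_pass\"your_user\"".toList
def pvB3 : List Char := "'your_user'your_pass'".toList
def pvB4 : List Char := "'your_pass'your_user'".toList
def pvPu : List Char := "your_user".toList
def pvPp : List Char := "your_pass".toList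

-- clean leftmost non-overlapping replacement (the value computed by str.replace for a
-- nonempty pattern); proved equal to PySem.Chars.replace below
def pvRep (k r : List Char) : List Char → List Char
  | [] => []
  | c :: t => if k.isPrefixOf (c :: t) then r ++ pvRep k r (t.drop (k.length - 1))
              else c :: pvRep k r t
  termination_by s => s.length
  decreasing_by all_goals (simp; try omega)

lemma pvRep_cons {k : List Char} (r : List Char) {c : Char} {t : List Char}
    (h : ¬ k <+: (c :: t)) : pvRep k r (c :: t) = c :: pvRep k r t := by
  simp only [pvRep]
  rw [if_neg (by rw [List.isPrefixOf_iff_prefix]; exact h)]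

lemma pvRep_match {k r : List Char} (hk : k ≠ []) (t : List Char) :
    pvRep k r (k ++ t) = r ++ pvRep k r t := by
  cases k with
  | nil => exact absurd rfl hk
  | cons c k' =>
    rw [List.cons_append]
    simp only [pvRep]
    rw [if_pos (by rw [List.isPrefixOf_iff_prefix]; exact List.prefix_append _ _)]
    congr 1
    have : (c :: k').length - 1 = k'.length := by simp
    rw [this, List.drop_left]

lemma pvRep_go (old new : List Char) (hold : old ≠ []) :
    ∀ (fuel : Nat) (l acc : List Char), l.length ≤ fuel →
      PySem.Chars.replace.go old new fuel l acc = acc.reverse ++ pvRep old new l := by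
  intro fuel
  induction fuel with
  | zero =>
    intro l acc hl
    have hnil : l = [] := by
      cases l with
      | nil => rfl
      | cons a b => simp at hl
    subst hnil
    simp [PySem.Chars.replace.go, pvRep]
  | succ f ih =>
    intro l acc hl
    cases l with
    | nil => simp [PySem.Chars.replace.go, pvRep]
    | cons c t =>
      have hol : 1 ≤ old.length := by
        cases old with
        | nil => exact absurd rfl hold
        | cons a b => simp
      by_cases hp : old.isPrefixOf (c :: t)
      · have e1 : PySem.Chars.replace.go old new (f + 1) (c :: t) acc =
            PySem.Chars.replace.go old new f ((c :: t).drop old.length) (new.reverse ++ acc) := by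
          simp only [PySem.Chars.replace.go]
          rw [if_pos hp]
        rw [e1, ih _ _ (by simp at hl ⊢; omega)]
        simp only [pvRep]
        rw [if_pos hp]
        have e2 : (c :: t).drop old.length = t.drop (old.length - 1) := by
          cases old with
          | nil => exact absurd rfl hold
          | cons a b => simp
        rw [e2]
        simp
      · have e1 : PySem.Chars.replace.go old new (f + 1) (c :: t) acc =
            PySem.Chars.replace.go old new f t (c :: acc) := by
          simp only [PySem.Chars.replace.go]
          rw [if_neg hp]
        rw [e1, ih _ _ (by simp at hl ⊢; omega)]
        simp only [pvRep]
        rw [if_neg hp]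
        simp

lemma pvReplace_eq (s old new : List Char) (h : old ≠ []) :
    PySem.Chars.replace s old new = pvRep old new s := by
  have he : old.isEmpty = false := by
    cases old with
    | nil => exact absurd rfl h
    | cons a b => rfl
  rw [PySem.Chars.replace, he]
  simp only [Bool.false_eq_true, if_false]
  simpa using pvRep_go old new h s.length s [] (le_refl _)

lemma pvRep_append {k : List Char} (r : List Char) {u v : List Char}
    (h : ∀ i, i < u.length → ¬ k <+: (u.drop i ++ v)) :
    pvRep k r (u ++ v) = u ++ pvRep k r v := by
  induction u with
  | nil => simp
  | cons a u' ih =>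
    have h0 : ¬ k <+: (a :: (u' ++ v)) := by
      have := h 0 (by simp)
      simpa using this
    rw [List.cons_append, pvRep_cons r h0, ih (fun i hi => by
      have := h (i + 1) (by simp; omega)
      simpa using this)]
    rfl

lemma pvRep_skip {k r : List Char} (u : List Char) {v : List Char}
    (hk : k ≠ []) (h : ∀ a ∈ u, k.head? ≠ some a) :
    pvRep k r (u ++ v) = u ++ pvRep k r v := by
  induction u with
  | nil => simp
  | cons a u' ih =>
    have h0 : ¬ k <+: (a :: (u' ++ v)) := by
      intro hp
      cases k with
      | nil => exact absurd rfl hk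
      | cons b k'' =>
        rw [List.cons_prefix_cons] at hp
        exact (h a (by simp)) (by rw [hp.1]; rfl)
    rw [List.cons_append, pvRep_cons r h0, ih (fun a ha => h a (by simp [ha]))]
    rfl

lemma pvNpre {k u : List Char} (v : List Char) (j : Nat)
    (hjk : j < k.length) (hju : j < u.length) (hne : k[j]? ≠ u[j]?) :
    ¬ k <+: (u ++ v) := by
  rintro ⟨s, hs⟩
  apply hne
  calc k[j]? = (k ++ s)[j]? := (List.getElem?_append_left hjk).symm
    _ = (u ++ v)[j]? := by rw [hs]
    _ = u[j]? := List.getElem?_append_left hju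

-- a pattern avoiding the head characters of k and r passes through pvRep untouched
lemma pvPass {k r : List Char} (_hk : k ≠ []) (hr : r ≠ []) :
    ∀ (t p : List Char), (∀ a ∈ p, k.head? ≠ some a ∧ r.head? ≠ some a) →
      p <+: pvRep k r t → p <+: t := by
  intro t
  induction t with
  | nil =>
    intro p hp hpre
    simpa [pvRep] using hpre
  | cons c t' ih =>
    intro p hp hpre
    cases p with
    | nil => exact List.nil_prefix
    | cons a p' =>
      simp only [pvRep] at hpre
      by_cases hm : k.isPrefixOf (c :: t')
      · rw [if_pos hm] at hpre
        cases r with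
        | nil => exact absurd rfl hr
        | cons d r'' =>
          rw [List.cons_append, List.cons_prefix_cons] at hpre
          exact absurd (by rw [hpre.1]; rfl) (hp a (by simp)).2
      · rw [if_neg hm] at hpre
        rw [List.cons_prefix_cons] at hpre ⊢
        exact ⟨hpre.1, ih p' (fun a ha => hp a (by simp [ha])) hpre.2⟩

-- a pattern ending in the shared head character q of k and r is a prefix of pvRep's
-- output only if it already was a prefix of the input
lemma pvCreate {k r : List Char} {q : Char}
    (hk : k.head? = some q) (hr : r.head? = some q) :
    ∀ (t p : List Char), (∀ a ∈ p, a ≠ q) →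
      (p ++ [q]) <+: pvRep k r t → (p ++ [q]) <+: t := by
  intro t
  induction t with
  | nil =>
    intro p hp hpre
    rw [pvRep] at hpre
    rw [List.prefix_nil] at hpre
    simp at hpre
  | cons c t' ih =>
    intro p hp hpre
    simp only [pvRep] at hpre
    by_cases hm : k.isPrefixOf (c :: t')
    · rw [if_pos hm] at hpre
      cases p with
      | nil =>
        have hc : c = q := by
          have := List.isPrefixOf_iff_prefix.mp hm
          cases k with
          | nil => simp at hk
          | cons b k'' =>
            rw [List.cons_prefix_cons] at this
            have hb : b = q := by simpa using hk
            rw [← hb, this.1]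
        simp only [List.nil_append]
        rw [hc]
        exact ⟨t', rfl⟩
      | cons a p' =>
        cases r with
        | nil => simp at hr
        | cons d r'' =>
          rw [List.cons_append, List.cons_append, List.cons_prefix_cons] at hpre
          have hd : d = q := by simpa using hr
          exact absurd (by rw [hpre.1, hd]) (hp a (by simp))
    · rw [if_neg hm] at hpre
      cases p with
      | nil =>
        simp only [List.nil_append] at hpre ⊢
        rw [List.cons_prefix_cons] at hpre ⊢
        exact ⟨hpre.1, List.nil_prefix⟩
      | cons a p' =>
        rw [List.cons_append, List.cons_prefix_cons] at hpre
        rw [List.cons_append, List.cons_prefix_cons]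
        exact ⟨hpre.1, ih p' (fun a ha => hp a (by simp [ha])) hpre.2⟩

-- creation pullbacks for the four quoted keys
lemma pvAllNeC {q : Char} {u : List Char} (h : u.all (fun a => !(a == q)) = true) :
    ∀ a ∈ u, a ≠ q := by
  intro a ha
  have := List.all_eq_true.mp h a ha
  simpa using this

lemma pvPull1 {t : List Char} (h : (pvPp ++ ['"']) <+: pvRep pvK1 pvR1 t) :
    (pvPp ++ ['"']) <+: t :=
  pvCreate (k := pvK1) (r := pvR1) (q := '"') rfl rfl t pvPp (pvAllNeC rfl) h

lemma pvPull3 {t : List Char} (h : (pvPp ++ ['\'']) <+: pvRep pvK3 pvR3 t) :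
    (pvPp ++ ['\'']) <+: t :=
  pvCreate (k := pvK3) (r := pvR3) (q := '\'') rfl rfl t pvPp (pvAllNeC rfl) h

-- pvScan equations

lemma pvScan_k1 (t : List Char) : pvScan (pvK1 ++ t) = pvR1 ++ pvScan t := by
  rw [show pvK1 ++ t = '"' :: ("your_user\"".toList ++ t) from rfl]
  simp only [pvScan]
  rw [if_pos (by rw [List.isPrefixOf_iff_prefix]; exact List.prefix_append pvK1 t)]
  rw [List.drop_left' (by decide)]

lemma pvScan_k2 (t : List Char) : pvScan (pvK2 ++ t) = pvR2 ++ pvScan t := by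
  rw [show pvK2 ++ t = '"' :: ("your_pass\"".toList ++ t) from rfl]
  simp only [pvScan]
  rw [if_neg (by rw [List.isPrefixOf_iff_prefix]; exact pvNpre (u := pvK2) t 6 (by decide) (by decide) (by decide))]
  rw [if_pos (by rw [List.isPrefixOf_iff_prefix]; exact List.prefix_append pvK2 t)]
  rw [List.drop_left' (by decide)]

lemma pvScan_k3 (t : List Char) : pvScan (pvK3 ++ t) = pvR3 ++ pvScan t := by
  rw [show pvK3 ++ t = '\'' :: ("your_user'".toList ++ t) from rfl]
  simp only [pvScan]
  rw [if_neg (by rw [List.isPrefixOf_iff_prefix]; exact pvNpre (u := pvK3) t 0 (by decide) (by decide) (by decide))]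
  rw [if_neg (by rw [List.isPrefixOf_iff_prefix]; exact pvNpre (u := pvK3) t 0 (by decide) (by decide) (by decide))]
  rw [if_pos (by rw [List.isPrefixOf_iff_prefix]; exact List.prefix_append pvK3 t)]
  rw [List.drop_left' (by decide)]

lemma pvScan_k4 (t : List Char) : pvScan (pvK4 ++ t) = pvR4 ++ pvScan t := by
  rw [show pvK4 ++ t = '\'' :: ("your_pass'".toList ++ t) from rfl]
  simp only [pvScan]
  rw [if_neg (by rw [List.isPrefixOf_iff_prefix]; exact pvNpre (u := pvK4) t 0 (by decide) (by decide) (by decide))]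
  rw [if_neg (by rw [List.isPrefixOf_iff_prefix]; exact pvNpre (u := pvK4) t 0 (by decide) (by decide) (by decide))]
  rw [if_neg (by rw [List.isPrefixOf_iff_prefix]; exact pvNpre (u := pvK4) t 6 (by decide) (by decide) (by decide))]
  rw [if_pos (by rw [List.isPrefixOf_iff_prefix]; exact List.prefix_append pvK4 t)]
  rw [List.drop_left' (by decide)]

lemma pvScan_k5 (t : List Char) : pvScan (pvK5 ++ t) = pvR5 ++ pvScan t := by
  rw [show pvK5 ++ t = 'h' :: ("ub.graphistry.com".toList ++ t) from rfl]
  simp only [pvScan]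
  rw [if_neg (by rw [List.isPrefixOf_iff_prefix]; exact pvNpre (u := pvK5) t 0 (by decide) (by decide) (by decide))]
  rw [if_neg (by rw [List.isPrefixOf_iff_prefix]; exact pvNpre (u := pvK5) t 0 (by decide) (by decide) (by decide))]
  rw [if_neg (by rw [List.isPrefixOf_iff_prefix]; exact pvNpre (u := pvK5) t 0 (by decide) (by decide) (by decide))]
  rw [if_neg (by rw [List.isPrefixOf_iff_prefix]; exact pvNpre (u := pvK5) t 0 (by decide) (by decide) (by decide))]
  rw [if_pos (by rw [List.isPrefixOf_iff_prefix]; exact List.prefix_append pvK5 t)]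
  rw [List.drop_left' (by decide)]

lemma pvScan_cons {c : Char} {t : List Char}
    (h1 : ¬ pvK1 <+: (c :: t)) (h2 : ¬ pvK2 <+: (c :: t)) (h3 : ¬ pvK3 <+: (c :: t))
    (h4 : ¬ pvK4 <+: (c :: t)) (h5 : ¬ pvK5 <+: (c :: t)) :
    pvScan (c :: t) = c :: pvScan t := by
  simp only [pvScan]
  rw [if_neg (by rw [List.isPrefixOf_iff_prefix]; exact h1),
      if_neg (by rw [List.isPrefixOf_iff_prefix]; exact h2),
      if_neg (by rw [List.isPrefixOf_iff_prefix]; exact h3),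
      if_neg (by rw [List.isPrefixOf_iff_prefix]; exact h4),
      if_neg (by rw [List.isPrefixOf_iff_prefix]; exact h5)]

-- generic converters: one Boolean evaluation (by rfl) per literal fact
lemma pvAllNe {k u : List Char} (h : u.all (fun a => !(k.head? == some a)) = true) :
    ∀ a ∈ u, k.head? ≠ some a := by
  intro a ha
  have := List.all_eq_true.mp h a ha
  simpa using this

lemma pvAllNe2 {k r u : List Char}
    (h : u.all (fun a => (!(k.head? == some a)) && (!(r.head? == some a))) = true) :
    ∀ a ∈ u, k.head? ≠ some a ∧ r.head? ≠ some a := by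
  intro a ha
  have := List.all_eq_true.mp h a ha
  simp at this
  exact ⟨by simpa using this.1, by simpa using this.2⟩

-- literal facts
lemma pvEqK1 : pvK1 = '"' :: (pvPu ++ ['"']) := rfl
lemma pvEqK2 : pvK2 = '"' :: (pvPp ++ ['"']) := rfl
lemma pvEqK2' : pvK2 = "\"your_pass".toList ++ ['"'] := rfl
lemma pvEqK3 : pvK3 = '\'' :: (pvPu ++ ['\'']) := rfl
lemma pvEqK4 : pvK4 = '\'' :: (pvPp ++ ['\'']) := rfl
lemma pvEqK5 : pvK5 = 'h' :: "ub.graphistry.com".toList := rfl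
lemma pvEqB1 : pvB1 = pvK1 ++ (pvPp ++ ['"']) := rfl
lemma pvEqB2 : pvB2 = pvK2 ++ (pvPu ++ ['"']) := rfl
lemma pvEqB3 : pvB3 = pvK3 ++ (pvPp ++ ['\'']) := rfl
lemma pvEqB4 : pvB4 = pvK4 ++ (pvPu ++ ['\'']) := rfl
lemma pvDropR1 : pvR1.drop 10 = ['"'] := rfl
lemma pvDropR3 : pvR3.drop 10 = ['\''] := rfl
lemma pvDropK4 : pvK4.drop 10 = ['\''] := rfl
lemma pvSkipR1K3 : ∀ a ∈ pvR1, pvK3.head? ≠ some a := pvAllNe rfl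
lemma pvSkipR1K4 : ∀ a ∈ pvR1, pvK4.head? ≠ some a := pvAllNe rfl
lemma pvSkipR1K5 : ∀ a ∈ pvR1, pvK5.head? ≠ some a := pvAllNe rfl
lemma pvSkipR2K3 : ∀ a ∈ pvR2, pvK3.head? ≠ some a := pvAllNe rfl
lemma pvSkipR2K4 : ∀ a ∈ pvR2, pvK4.head? ≠ some a := pvAllNe rfl
lemma pvSkipR2K5 : ∀ a ∈ pvR2, pvK5.head? ≠ some a := pvAllNe rfl
lemma pvSkipK3K1 : ∀ a ∈ pvK3, pvK1.head? ≠ some a := pvAllNe rfl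
lemma pvSkipK3K2 : ∀ a ∈ pvK3, pvK2.head? ≠ some a := pvAllNe rfl
lemma pvSkipR3K5 : ∀ a ∈ pvR3, pvK5.head? ≠ some a := pvAllNe rfl
lemma pvSkipK4K1 : ∀ a ∈ pvK4, pvK1.head? ≠ some a := pvAllNe rfl
lemma pvSkipK4K2 : ∀ a ∈ pvK4, pvK2.head? ≠ some a := pvAllNe rfl
lemma pvSkipR4K5 : ∀ a ∈ pvR4, pvK5.head? ≠ some a := pvAllNe rfl
lemma pvSkipK5K1 : ∀ a ∈ pvK5, pvK1.head? ≠ some a := pvAllNe rfl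
lemma pvSkipK5K2 : ∀ a ∈ pvK5, pvK2.head? ≠ some a := pvAllNe rfl
lemma pvSkipK5K3 : ∀ a ∈ pvK5, pvK3.head? ≠ some a := pvAllNe rfl
lemma pvSkipK5K4 : ∀ a ∈ pvK5, pvK4.head? ≠ some a := pvAllNe rfl
lemma pvPatPp1 : ∀ a ∈ pvPp ++ ['\''], pvK1.head? ≠ some a ∧ pvR1.head? ≠ some a := pvAllNe2 rfl
lemma pvPatPp2 : ∀ a ∈ pvPp ++ ['\''], pvK2.head? ≠ some a ∧ pvR2.head? ≠ some a := pvAllNe2 rfl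
lemma pvPatPu1 : ∀ a ∈ pvPu ++ ['\''], pvK1.head? ≠ some a ∧ pvR1.head? ≠ some a := pvAllNe2 rfl
lemma pvPatPu2 : ∀ a ∈ pvPu ++ ['\''], pvK2.head? ≠ some a ∧ pvR2.head? ≠ some a := pvAllNe2 rfl
lemma pvPatT51 : ∀ a ∈ "ub.graphistry.com".toList, pvK1.head? ≠ some a ∧ pvR1.head? ≠ some a := pvAllNe2 rfl
lemma pvPatT52 : ∀ a ∈ "ub.graphistry.com".toList, pvK2.head? ≠ some a ∧ pvR2.head? ≠ some a := pvAllNe2 rfl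
lemma pvPatT53 : ∀ a ∈ "ub.graphistry.com".toList, pvK3.head? ≠ some a ∧ pvR3.head? ≠ some a := pvAllNe2 rfl
lemma pvPatT54 : ∀ a ∈ "ub.graphistry.com".toList, pvK4.head? ≠ some a ∧ pvR4.head? ≠ some a := pvAllNe2 rfl

def pvF (cs : List Char) : List Char :=
  pvRep pvK5 pvR5 (pvRep pvK4 pvR4 (pvRep pvK3 pvR3 (pvRep pvK2 pvR2 (pvRep pvK1 pvR1 cs))))

set_option maxRecDepth 8192 in
lemma pvMain (n : Nat) : ∀ (cs : List Char), cs.length ≤ n →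
    ¬ (pvB1 <:+: cs) → ¬ (pvB2 <:+: cs) → ¬ (pvB3 <:+: cs) → ¬ (pvB4 <:+: cs) →
    pvF cs = pvScan cs := by
  induction n with
  | zero =>
    intro cs hl _ _ _ _
    have hnil : cs = [] := by
      cases cs with
      | nil => rfl
      | cons a b => simp at hl
    subst hnil
    simp [pvF, pvRep, pvScan]
  | succ n ih =>
    intro cs hlen hb1 hb2 hb3 hb4
    by_cases h1 : pvK1 <+: cs
    · obtain ⟨t, rfl⟩ := h1
      have hlt : t.length ≤ n := by
        rw [List.length_append, show pvK1.length = 11 from by decide] at hlen; omega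
      have ht1 : ¬ pvB1 <:+: t := fun h => hb1 (h.trans (List.suffix_append pvK1 t).isInfix)
      have ht2 : ¬ pvB2 <:+: t := fun h => hb2 (h.trans (List.suffix_append pvK1 t).isInfix)
      have ht3 : ¬ pvB3 <:+: t := fun h => hb3 (h.trans (List.suffix_append pvK1 t).isInfix)
      have ht4 : ¬ pvB4 <:+: t := fun h => hb4 (h.trans (List.suffix_append pvK1 t).isInfix)
      have s2 : pvRep pvK2 pvR2 (pvR1 ++ pvRep pvK1 pvR1 t)
          = pvR1 ++ pvRep pvK2 pvR2 (pvRep pvK1 pvR1 t) := by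
        apply pvRep_append
        intro i hi
        rw [show pvR1.length = 11 from by decide] at hi
        interval_cases i
        · exact pvNpre _ 6 (by decide) (by decide) (by decide)
        · exact pvNpre _ 0 (by decide) (by decide) (by decide)
        · exact pvNpre _ 0 (by decide) (by decide) (by decide)
        · exact pvNpre _ 0 (by decide) (by decide) (by decide)
        · exact pvNpre _ 0 (by decide) (by decide) (by decide)
        · exact pvNpre _ 0 (by decide) (by decide) (by decide)
        · exact pvNpre _ 0 (by decide) (by decide) (by decide)
        · exact pvNpre _ 0 (by decide) (by decide) (by decide)
        · exact pvNpre _ 0 (by decide) (by decide) (by decide)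
        · exact pvNpre _ 0 (by decide) (by decide) (by decide)
        · rw [pvDropR1]
          intro hp
          rw [pvEqK2,
              List.singleton_append, List.cons_prefix_cons] at hp
          obtain ⟨s, hs⟩ := pvPull1 hp.2
          exact hb1 (List.IsPrefix.isInfix ⟨s, by
            rw [pvEqB1, List.append_assoc, hs]⟩)
      unfold pvF
      rw [pvRep_match (k := pvK1) (r := pvR1) (by decide) t, s2,
          pvRep_skip (k := pvK3) (r := pvR3) pvR1 (by decide) pvSkipR1K3,
          pvRep_skip (k := pvK4) (r := pvR4) pvR1 (by decide) pvSkipR1K4,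
          pvRep_skip (k := pvK5) (r := pvR5) pvR1 (by decide) pvSkipR1K5,
          pvScan_k1]
      have hI := ih t hlt ht1 ht2 ht3 ht4
      unfold pvF at hI
      rw [hI]
    by_cases h2 : pvK2 <+: cs
    · obtain ⟨t, rfl⟩ := h2
      have hlt : t.length ≤ n := by
        rw [List.length_append, show pvK2.length = 11 from by decide] at hlen; omega
      have ht1 : ¬ pvB1 <:+: t := fun h => hb1 (h.trans (List.suffix_append pvK2 t).isInfix)
      have ht2 : ¬ pvB2 <:+: t := fun h => hb2 (h.trans (List.suffix_append pvK2 t).isInfix)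
      have ht3 : ¬ pvB3 <:+: t := fun h => hb3 (h.trans (List.suffix_append pvK2 t).isInfix)
      have ht4 : ¬ pvB4 <:+: t := fun h => hb4 (h.trans (List.suffix_append pvK2 t).isInfix)
      have hnp : ¬ pvK1 <+: ('"' :: t) := by
        intro hp
        rw [pvEqK1, List.cons_prefix_cons] at hp
        obtain ⟨s, hs⟩ := hp.2
        exact hb2 (List.IsPrefix.isInfix ⟨s, by
          rw [pvEqB2, List.append_assoc, hs]⟩)
      have s1 : pvRep pvK1 pvR1 (pvK2 ++ t) = pvK2 ++ pvRep pvK1 pvR1 t := by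
        rw [show pvK2 ++ t = "\"your_pass".toList ++ ('"' :: t) from by
          rw [pvEqK2', List.append_assoc]; rfl]
        rw [pvRep_append pvR1 (by
          intro i hi
          rw [show ("\"your_pass".toList).length = 10 from by decide] at hi
          interval_cases i
          · exact pvNpre _ 6 (by decide) (by decide) (by decide)
          · exact pvNpre _ 0 (by decide) (by decide) (by decide)
          · exact pvNpre _ 0 (by decide) (by decide) (by decide)
          · exact pvNpre _ 0 (by decide) (by decide) (by decide)
          · exact pvNpre _ 0 (by decide) (by decide) (by decide)
          · exact pvNpre _ 0 (by decide) (by decide) (by decide)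
          · exact pvNpre _ 0 (by decide) (by decide) (by decide)
          · exact pvNpre _ 0 (by decide) (by decide) (by decide)
          · exact pvNpre _ 0 (by decide) (by decide) (by decide)
          · exact pvNpre _ 0 (by decide) (by decide) (by decide))]
        rw [pvRep_cons pvR1 hnp]
        rw [pvEqK2', List.append_assoc]
        rfl
      unfold pvF
      rw [s1, pvRep_match (k := pvK2) (r := pvR2) (by decide),
          pvRep_skip (k := pvK3) (r := pvR3) pvR2 (by decide) pvSkipR2K3,
          pvRep_skip (k := pvK4) (r := pvR4) pvR2 (by decide) pvSkipR2K4,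
          pvRep_skip (k := pvK5) (r := pvR5) pvR2 (by decide) pvSkipR2K5,
          pvScan_k2]
      have hI := ih t hlt ht1 ht2 ht3 ht4
      unfold pvF at hI
      rw [hI]
    by_cases h3 : pvK3 <+: cs
    · obtain ⟨t, rfl⟩ := h3
      have hlt : t.length ≤ n := by
        rw [List.length_append, show pvK3.length = 11 from by decide] at hlen; omega
      have ht1 : ¬ pvB1 <:+: t := fun h => hb1 (h.trans (List.suffix_append pvK3 t).isInfix)
      have ht2 : ¬ pvB2 <:+: t := fun h => hb2 (h.trans (List.suffix_append pvK3 t).isInfix)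
      have ht3 : ¬ pvB3 <:+: t := fun h => hb3 (h.trans (List.suffix_append pvK3 t).isInfix)
      have ht4 : ¬ pvB4 <:+: t := fun h => hb4 (h.trans (List.suffix_append pvK3 t).isInfix)
      have s4 : pvRep pvK4 pvR4
            (pvR3 ++ pvRep pvK3 pvR3 (pvRep pvK2 pvR2 (pvRep pvK1 pvR1 t)))
          = pvR3 ++ pvRep pvK4 pvR4
            (pvRep pvK3 pvR3 (pvRep pvK2 pvR2 (pvRep pvK1 pvR1 t))) := by
        apply pvRep_append
        intro i hi
        rw [show pvR3.length = 11 from by decide] at hi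
        interval_cases i
        · exact pvNpre _ 6 (by decide) (by decide) (by decide)
        · exact pvNpre _ 0 (by decide) (by decide) (by decide)
        · exact pvNpre _ 0 (by decide) (by decide) (by decide)
        · exact pvNpre _ 0 (by decide) (by decide) (by decide)
        · exact pvNpre _ 0 (by decide) (by decide) (by decide)
        · exact pvNpre _ 0 (by decide) (by decide) (by decide)
        · exact pvNpre _ 0 (by decide) (by decide) (by decide)
        · exact pvNpre _ 0 (by decide) (by decide) (by decide)
        · exact pvNpre _ 0 (by decide) (by decide) (by decide)
        · exact pvNpre _ 0 (by decide) (by decide) (by decide)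
        · rw [pvDropR3]
          intro hp
          rw [pvEqK4,
              List.singleton_append, List.cons_prefix_cons] at hp
          have hw := pvPass (k := pvK2) (r := pvR2) (by decide) (by decide) _
            (pvPp ++ ['\'']) pvPatPp2 (pvPull3 hp.2)
          obtain ⟨s, hs⟩ := pvPass (k := pvK1) (r := pvR1) (by decide) (by decide) _
            (pvPp ++ ['\'']) pvPatPp1 hw
          exact hb3 (List.IsPrefix.isInfix ⟨s, by
            rw [pvEqB3, List.append_assoc, hs]⟩)
      unfold pvF
      rw [pvRep_skip (k := pvK1) (r := pvR1) pvK3 (by decide) pvSkipK3K1,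
          pvRep_skip (k := pvK2) (r := pvR2) pvK3 (by decide) pvSkipK3K2,
          pvRep_match (k := pvK3) (r := pvR3) (by decide), s4,
          pvRep_skip (k := pvK5) (r := pvR5) pvR3 (by decide) pvSkipR3K5,
          pvScan_k3]
      have hI := ih t hlt ht1 ht2 ht3 ht4
      unfold pvF at hI
      rw [hI]
    by_cases h4 : pvK4 <+: cs
    · obtain ⟨t, rfl⟩ := h4
      have hlt : t.length ≤ n := by
        rw [List.length_append, show pvK4.length = 11 from by decide] at hlen; omega
      have ht1 : ¬ pvB1 <:+: t := fun h => hb1 (h.trans (List.suffix_append pvK4 t).isInfix)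
      have ht2 : ¬ pvB2 <:+: t := fun h => hb2 (h.trans (List.suffix_append pvK4 t).isInfix)
      have ht3 : ¬ pvB3 <:+: t := fun h => hb3 (h.trans (List.suffix_append pvK4 t).isInfix)
      have ht4 : ¬ pvB4 <:+: t := fun h => hb4 (h.trans (List.suffix_append pvK4 t).isInfix)
      have s3 : pvRep pvK3 pvR3 (pvK4 ++ pvRep pvK2 pvR2 (pvRep pvK1 pvR1 t))
          = pvK4 ++ pvRep pvK3 pvR3 (pvRep pvK2 pvR2 (pvRep pvK1 pvR1 t)) := by
        apply pvRep_append
        intro i hi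
        rw [show pvK4.length = 11 from by decide] at hi
        interval_cases i
        · exact pvNpre _ 6 (by decide) (by decide) (by decide)
        · exact pvNpre _ 0 (by decide) (by decide) (by decide)
        · exact pvNpre _ 0 (by decide) (by decide) (by decide)
        · exact pvNpre _ 0 (by decide) (by decide) (by decide)
        · exact pvNpre _ 0 (by decide) (by decide) (by decide)
        · exact pvNpre _ 0 (by decide) (by decide) (by decide)
        · exact pvNpre _ 0 (by decide) (by decide) (by decide)
        · exact pvNpre _ 0 (by decide) (by decide) (by decide)
        · exact pvNpre _ 0 (by decide) (by decide) (by decide)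
        · exact pvNpre _ 0 (by decide) (by decide) (by decide)
        · rw [pvDropK4]
          intro hp
          rw [pvEqK3,
              List.singleton_append, List.cons_prefix_cons] at hp
          have hw := pvPass (k := pvK2) (r := pvR2) (by decide) (by decide) _
            (pvPu ++ ['\'']) pvPatPu2 hp.2
          obtain ⟨s, hs⟩ := pvPass (k := pvK1) (r := pvR1) (by decide) (by decide) _
            (pvPu ++ ['\'']) pvPatPu1 hw
          exact hb4 (List.IsPrefix.isInfix ⟨s, by
            rw [pvEqB4, List.append_assoc, hs]⟩)
      unfold pvF
      rw [pvRep_skip (k := pvK1) (r := pvR1) pvK4 (by decide) pvSkipK4K1,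
          pvRep_skip (k := pvK2) (r := pvR2) pvK4 (by decide) pvSkipK4K2,
          s3, pvRep_match (k := pvK4) (r := pvR4) (by decide),
          pvRep_skip (k := pvK5) (r := pvR5) pvR4 (by decide) pvSkipR4K5,
          pvScan_k4]
      have hI := ih t hlt ht1 ht2 ht3 ht4
      unfold pvF at hI
      rw [hI]
    by_cases h5 : pvK5 <+: cs
    · obtain ⟨t, rfl⟩ := h5
      have hlt : t.length ≤ n := by
        rw [List.length_append, show pvK5.length = 18 from by decide] at hlen; omega
      have ht1 : ¬ pvB1 <:+: t := fun h => hb1 (h.trans (List.suffix_append pvK5 t).isInfix)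
      have ht2 : ¬ pvB2 <:+: t := fun h => hb2 (h.trans (List.suffix_append pvK5 t).isInfix)
      have ht3 : ¬ pvB3 <:+: t := fun h => hb3 (h.trans (List.suffix_append pvK5 t).isInfix)
      have ht4 : ¬ pvB4 <:+: t := fun h => hb4 (h.trans (List.suffix_append pvK5 t).isInfix)
      unfold pvF
      rw [pvRep_skip (k := pvK1) (r := pvR1) pvK5 (by decide) pvSkipK5K1,
          pvRep_skip (k := pvK2) (r := pvR2) pvK5 (by decide) pvSkipK5K2,
          pvRep_skip (k := pvK3) (r := pvR3) pvK5 (by decide) pvSkipK5K3,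
          pvRep_skip (k := pvK4) (r := pvR4) pvK5 (by decide) pvSkipK5K4,
          pvRep_match (k := pvK5) (r := pvR5) (by decide),
          pvScan_k5]
      have hI := ih t hlt ht1 ht2 ht3 ht4
      unfold pvF at hI
      rw [hI]
    · cases cs with
      | nil => simp [pvF, pvRep, pvScan]
      | cons c t =>
        have hlt : t.length ≤ n := by simp at hlen; omega
        have ht1 : ¬ pvB1 <:+: t := fun h => hb1 (h.trans (List.suffix_cons c t).isInfix)
        have ht2 : ¬ pvB2 <:+: t := fun h => hb2 (h.trans (List.suffix_cons c t).isInfix)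
        have ht3 : ¬ pvB3 <:+: t := fun h => hb3 (h.trans (List.suffix_cons c t).isInfix)
        have ht4 : ¬ pvB4 <:+: t := fun h => hb4 (h.trans (List.suffix_cons c t).isInfix)
        have n2 : ¬ pvK2 <+: (c :: pvRep pvK1 pvR1 t) := by
          intro hp
          rw [pvEqK2, List.cons_prefix_cons] at hp
          exact h2 (by
            rw [pvEqK2, List.cons_prefix_cons]
            exact ⟨hp.1, pvPull1 hp.2⟩)
        have n3 : ¬ pvK3 <+: (c :: pvRep pvK2 pvR2 (pvRep pvK1 pvR1 t)) := by
          intro hp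
          rw [pvEqK3, List.cons_prefix_cons] at hp
          have hw := pvPass (k := pvK1) (r := pvR1) (by decide) (by decide) _
            (pvPu ++ ['\'']) pvPatPu1
            (pvPass (k := pvK2) (r := pvR2) (by decide) (by decide) _
              (pvPu ++ ['\'']) pvPatPu2 hp.2)
          exact h3 (by
            rw [pvEqK3, List.cons_prefix_cons]
            exact ⟨hp.1, hw⟩)
        have n4 : ¬ pvK4 <+: (c :: pvRep pvK3 pvR3 (pvRep pvK2 pvR2 (pvRep pvK1 pvR1 t))) := by
          intro hp
          rw [pvEqK4, List.cons_prefix_cons] at hp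
          have hw := pvPass (k := pvK1) (r := pvR1) (by decide) (by decide) _
            (pvPp ++ ['\'']) pvPatPp1
            (pvPass (k := pvK2) (r := pvR2) (by decide) (by decide) _
              (pvPp ++ ['\'']) pvPatPp2
              (pvPull3 hp.2))
          exact h4 (by
            rw [pvEqK4, List.cons_prefix_cons]
            exact ⟨hp.1, hw⟩)
        have n5 : ¬ pvK5 <+:
            (c :: pvRep pvK4 pvR4 (pvRep pvK3 pvR3 (pvRep pvK2 pvR2 (pvRep pvK1 pvR1 t)))) := by
          intro hp
          rw [pvEqK5,
              List.cons_prefix_cons] at hp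
          have hw := pvPass (k := pvK1) (r := pvR1) (by decide) (by decide) _
            ("ub.graphistry.com".toList) pvPatT51
            (pvPass (k := pvK2) (r := pvR2) (by decide) (by decide) _
              ("ub.graphistry.com".toList) pvPatT52
              (pvPass (k := pvK3) (r := pvR3) (by decide) (by decide) _
                ("ub.graphistry.com".toList) pvPatT53
                (pvPass (k := pvK4) (r := pvR4) (by decide) (by decide) _
                  ("ub.graphistry.com".toList) pvPatT54 hp.2)))
          exact h5 (by
            rw [pvEqK5,
                List.cons_prefix_cons]
            exact ⟨hp.1, hw⟩)
        unfold pvF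
        rw [pvRep_cons pvR1 h1, pvRep_cons pvR2 n2, pvRep_cons pvR3 n3,
            pvRep_cons pvR4 n4, pvRep_cons pvR5 n5, pvScan_cons h1 h2 h3 h4 h5]
        have hI := ih t hlt ht1 ht2 ht3 ht4
        unfold pvF at hI
        rw [hI]

-- ===== VERDICT (by name: the statement is the Claim_ definition above) =====
theorem preprocess_code_spec : Claim_equal_preprocess_code := by
  intro code _ hPre
  unfold Spec_preprocess_code
  obtain ⟨p1, p2, p3, p4⟩ := hPre
  have hb : ∀ (b : String), PySem.Str.isIn b code = false → ¬ (b.toList <:+: code.toList) := by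
    intro b hbf hinf
    rw [(PySem.Str.isIn_iff_infix b code).mpr hinf] at hbf
    exact Bool.true_eq_false.mp hbf
  have hmain := pvMain code.toList.length code.toList (le_refl _)
    (hb _ p1) (hb _ p2) (hb _ p3) (hb _ p4)
  have hA : (preprocess_code code).toList = pvF code.toList := by
    simp only [preprocess_code, List.foldl, PySem.Str.toList_replace]
    rw [pvReplace_eq _ _ _ (by decide), pvReplace_eq _ _ _ (by decide),
        pvReplace_eq _ _ _ (by decide), pvReplace_eq _ _ _ (by decide),
        pvReplace_eq _ _ _ (by decide)]
    rfl
  have : (preprocess_code code).toList = (preprocess_code_alt code).toList := by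
    rw [hA, hmain]
    simp [preprocess_code_alt]
  calc preprocess_code code = String.ofList (preprocess_code code).toList :=
        (String.ofList_toList).symm
    _ = String.ofList (preprocess_code_alt code).toList := by rw [this]
    _ = preprocess_code_alt code := String.ofList_toList
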